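-- pv_equiv track=rewrite | github.com/Coni63/CG_repo | training/easy/unit-fractions.py | process
-- ===== SOURCE A (Python) =====
-- def getFactors(n):
--     nn = n * n
--     factors = []
--     for i in range(1, n+1):
--         if nn % i == 0: factors.append(i)
--     return factors
--
-- def process(n):
--     abList = []
--     nn = n * n;
--     factors = getFactors(n)
--     for factor in factors:
--         a = nn // factor
--         aa = a + n
--         bb = factor + n
--         abList.append((aa, bb))
--     return abList
-- ===== SOURCE B (Python) =====
-- from math import isqrt
--
-- def process(n):
--     if n <= 0:
--         return []
--     # divisors of n via sqrt pairing
--     divs = []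
--     i = 1
--     while i * i <= n:
--         if n % i == 0:
--             divs.append(i)
--             divs.append(n // i)
--         i += 1
--     # every divisor of n*n is a product of two divisors of n
--     prods = {a * b for a in divs for b in divs if a * b <= n}
--     nn = n * n
--     return [(nn // f + n, f + n) for f in sorted(prods)]
-- ===== Notes on version B (the rewrite author's own statement) =====
-- stated objective: faster
-- what changed: A scans all i in 1..n testing n^2 % i; B finds the divisors of n in O(sqrt(n)) by paired trial division, forms the set of products of two divisors bounded by n (exactly the divisors of n^2 that are <= n), and sorts it.
import Mathlib
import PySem

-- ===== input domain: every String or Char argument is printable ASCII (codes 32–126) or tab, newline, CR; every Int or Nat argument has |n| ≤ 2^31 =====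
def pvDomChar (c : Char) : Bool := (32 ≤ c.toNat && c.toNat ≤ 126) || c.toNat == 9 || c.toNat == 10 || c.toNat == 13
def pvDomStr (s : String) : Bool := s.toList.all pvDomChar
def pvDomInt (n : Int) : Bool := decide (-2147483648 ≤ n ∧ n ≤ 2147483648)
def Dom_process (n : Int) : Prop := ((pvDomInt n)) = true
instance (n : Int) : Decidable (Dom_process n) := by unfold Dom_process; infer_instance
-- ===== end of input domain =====

-- B replaces A's O(n) scan for divisors of n² below n by a √n divisor-pairing scan of n
-- plus the products-of-two-divisors characterisation of divisors of n² (objective: faster).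

-- ===== PORT A =====
def getFactors (n : Int) : List Int :=
  let nn := n * n
  (PySem.List.pyRange 1 (n + 1)).foldl
    (fun factors i => if PySem.Int.mod nn i == 0 then factors ++ [i] else factors) []

def process (n : Int) : List (List Int) :=
  let nn := n * n
  (getFactors n).foldl
    (fun abList factor =>
      let a := PySem.Int.floordiv nn factor
      let aa := a + n
      let bb := factor + n
      abList ++ [[aa, bb]]) []

-- ===== PORT B =====
-- the 'while i * i <= n' divisor-collecting loop of Source B
def divLoop (n i : Int) (divs : List Int) : List Int :=
  if _h : i * i ≤ n then
    divLoop n (i + 1)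
      (if PySem.Int.mod n i == 0 then divs ++ [i] ++ [PySem.Int.floordiv n i] else divs)
  else divs
termination_by (n + 1 - i).toNat
decreasing_by
  have hin : i ≤ n := by nlinarith [mul_self_nonneg (i - 1)]
  omega

def process_alt (n : Int) : List (List Int) :=
  if n ≤ 0 then []
  else
    let divs := divLoop n 1 []
    let prods := divs.foldl
      (fun s a => divs.foldl
        (fun s b => if a * b ≤ n then PySem.Set.add s (a * b) else s) s)
      (PySem.Set.empty : PySem.Set Int)
    let nn := n * n
    (PySem.List.sorted prods (fun x => x)).map
      (fun f => [PySem.Int.floordiv nn f + n, f + n])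

-- ===== PRECONDITION & SPEC =====
def Spec_process (n : Int) (out : List (List Int)) : Prop := out = process_alt n
instance (n : Int) (out : List (List Int)) : Decidable (Spec_process n out) := by
  unfold Spec_process; infer_instance

-- ===== CLAIM (what is proved, stated in full; the proofs are below) =====
def Claim_equal_process : Prop := ∀ (n : Int), Dom_process n → Spec_process n (process n)

-- ===== LEMMAS AND PROOFS =====

-- A's output is the mapped filter of the range 1..n
theorem process_eq_map_filter (n : Int) :
    process n = (((PySem.List.pyRange 1 (n + 1)).filter
        (fun i => PySem.Int.mod (n * n) i == 0)).map
      (fun f => [PySem.Int.floordiv (n * n) f + n, f + n])) := by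
  simp only [process, getFactors,
    PySem.List.foldl_append_if (fun i => PySem.Int.mod (n * n) i == 0) (fun i => i),
    PySem.List.foldl_append_singleton_eq_map, List.nil_append, List.map_map]
  simp [Function.comp]

-- invariant of Source B's √n loop: it collects exactly i and n // i for the i ≥ start with i² ≤ n, i ∣ n
theorem mem_divLoop (n : Int) (i : Int) (acc : List Int) (x : Int) :
    1 ≤ i → (x ∈ divLoop n i acc ↔
      x ∈ acc ∨ ∃ j, i ≤ j ∧ j * j ≤ n ∧ j ∣ n ∧ (x = j ∨ x = PySem.Int.floordiv n j)) := by
  induction i, acc using divLoop.induct (n := n) with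
  | case1 i acc h ih =>
    intro hi
    rw [divLoop, dif_pos h]
    simp only [dite_eq_ite] at ih
    rw [ih (by omega)]
    by_cases hc : PySem.Int.mod n i = 0
    · have hdvd : i ∣ n := (PySem.Int.mod_eq_zero_iff_dvd n i).mp hc
      simp only [hc, beq_self_eq_true, if_true, List.mem_append, List.mem_singleton]
      constructor
      · rintro (((hx | hx) | hx) | ⟨j, hij, hjj, hjd, hxj⟩)
        · exact Or.inl hx
        · exact Or.inr ⟨i, le_refl i, h, hdvd, Or.inl hx⟩
        · exact Or.inr ⟨i, le_refl i, h, hdvd, Or.inr hx⟩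
        · exact Or.inr ⟨j, by omega, hjj, hjd, hxj⟩
      · rintro (hx | ⟨j, hij, hjj, hjd, hxj⟩)
        · exact Or.inl (Or.inl (Or.inl hx))
        · by_cases hji : j = i
          · subst hji
            rcases hxj with hx | hx
            · exact Or.inl (Or.inl (Or.inr hx))
            · exact Or.inl (Or.inr hx)
          · exact Or.inr ⟨j, by omega, hjj, hjd, hxj⟩
    · have hndvd : ¬ i ∣ n := fun hd => hc ((PySem.Int.mod_eq_zero_iff_dvd n i).mpr hd)
      rw [if_neg (show ¬((PySem.Int.mod n i == 0) = true) by simpa using hc)]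
      constructor
      · rintro (hx | ⟨j, hij, hjj, hjd, hxj⟩)
        · exact Or.inl hx
        · exact Or.inr ⟨j, by omega, hjj, hjd, hxj⟩
      · rintro (hx | ⟨j, hij, hjj, hjd, hxj⟩)
        · exact Or.inl hx
        · by_cases hji : j = i
          · exact absurd (hji ▸ hjd) hndvd
          · exact Or.inr ⟨j, by omega, hjj, hjd, hxj⟩
  | case2 i acc h =>
    intro hi
    rw [divLoop, dif_neg h]
    constructor
    · exact Or.inl
    · rintro (hx | ⟨j, hij, hjj, _, _⟩)
      · exact hx
      · exact absurd hjj (by nlinarith)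

-- membership in the set built by one row of Source B's product loop
theorem mem_innerFold (n a : Int) (l : List Int) (s : PySem.Set Int) (x : Int) :
    x ∈ l.foldl (fun s b => if a * b ≤ n then PySem.Set.add s (a * b) else s) s ↔
      x ∈ s ∨ ∃ b ∈ l, a * b ≤ n ∧ x = a * b := by
  induction l generalizing s with
  | nil => simp
  | cons b t ih =>
    simp only [List.foldl_cons, ih, List.mem_cons]
    by_cases hb : a * b ≤ n
    · rw [if_pos hb]
      simp only [PySem.Set.mem_add]
      constructor
      · rintro ((hs | hx) | ⟨c, hc, hcn, hx⟩)
        · exact Or.inl hs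
        · exact Or.inr ⟨b, Or.inl rfl, hb, hx⟩
        · exact Or.inr ⟨c, Or.inr hc, hcn, hx⟩
      · rintro (hs | ⟨c, (rfl | hc), hcn, hx⟩)
        · exact Or.inl (Or.inl hs)
        · exact Or.inl (Or.inr hx)
        · exact Or.inr ⟨c, hc, hcn, hx⟩
    · rw [if_neg hb]
      constructor
      · rintro (hs | ⟨c, hc, hcn, hx⟩)
        · exact Or.inl hs
        · exact Or.inr ⟨c, Or.inr hc, hcn, hx⟩
      · rintro (hs | ⟨c, (rfl | hc), hcn, hx⟩)
        · exact Or.inl hs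
        · exact absurd hcn hb
        · exact Or.inr ⟨c, hc, hcn, hx⟩

-- membership in the set built by Source B's nested product loop
theorem mem_prodFold (n : Int) (outer inner : List Int) (s : PySem.Set Int) (x : Int) :
    x ∈ outer.foldl
        (fun s a => inner.foldl
          (fun s b => if a * b ≤ n then PySem.Set.add s (a * b) else s) s) s ↔
      x ∈ s ∨ ∃ a ∈ outer, ∃ b ∈ inner, a * b ≤ n ∧ x = a * b := by
  induction outer generalizing s with
  | nil => simp
  | cons a t ih =>
    simp only [List.foldl_cons, ih, mem_innerFold, List.mem_cons]
    constructor
    · rintro ((hs | ⟨b, hb, hbn, hx⟩) | ⟨c, hc, b, hb, hbn, hx⟩)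
      · exact Or.inl hs
      · exact Or.inr ⟨a, Or.inl rfl, b, hb, hbn, hx⟩
      · exact Or.inr ⟨c, Or.inr hc, b, hb, hbn, hx⟩
    · rintro (hs | ⟨c, (rfl | hc), b, hb, hbn, hx⟩)
      · exact Or.inl (Or.inl hs)
      · exact Or.inl (Or.inr ⟨b, hb, hbn, hx⟩)
      · exact Or.inr ⟨c, hc, b, hb, hbn, hx⟩

theorem nodup_innerFold (n a : Int) (l : List Int) (s : PySem.Set Int) (hs : s.Nodup) :
    (l.foldl (fun s b => if a * b ≤ n then PySem.Set.add s (a * b) else s) s).Nodup := by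
  induction l generalizing s with
  | nil => exact hs
  | cons b t ih =>
    simp only [List.foldl_cons]
    split
    · exact ih _ (PySem.Set.nodup_add s (a * b) hs)
    · exact ih _ hs

theorem nodup_prodFold (n : Int) (outer inner : List Int) (s : PySem.Set Int)
    (hs : s.Nodup) :
    (outer.foldl
        (fun s a => inner.foldl
          (fun s b => if a * b ≤ n then PySem.Set.add s (a * b) else s) s) s).Nodup := by
  induction outer generalizing s with
  | nil => exact hs
  | cons a t ih => exact ih _ (nodup_innerFold n a inner s hs)

-- the collected list holds exactly the positive divisors of n
theorem mem_divs (n : Int) (hn : 0 < n) (x : Int) :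
    x ∈ divLoop n 1 [] ↔ 1 ≤ x ∧ x ∣ n := by
  rw [mem_divLoop n 1 [] x (le_refl 1)]
  simp only [List.not_mem_nil, false_or]
  constructor
  · rintro ⟨j, h1j, hjj, hjd, (rfl | rfl)⟩
    · exact ⟨h1j, hjd⟩
    · refine ⟨(PySem.Int.le_floordiv_iff_mul_le (by omega)).mpr (by nlinarith), ?_⟩
      rw [PySem.Int.floordiv_eq_ediv_of_pos (by omega)]
      exact ⟨j, (Int.ediv_mul_cancel hjd).symm⟩
  · rintro ⟨hx1, hxd⟩
    by_cases hxx : x * x ≤ n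
    · exact ⟨x, hx1, hxx, hxd, Or.inl rfl⟩
    · have hxn : x ≤ n := Int.le_of_dvd hn hxd
      have hj1 : 1 ≤ PySem.Int.floordiv n x :=
        (PySem.Int.le_floordiv_iff_mul_le (by omega)).mpr (by omega)
      set j := PySem.Int.floordiv n x with hjdef
      have hjx : j * x = n := by
        rw [hjdef, PySem.Int.floordiv_eq_ediv_of_pos (by omega)]
        exact Int.ediv_mul_cancel hxd
      have hjlt : j < x := by nlinarith
      refine ⟨j, hj1, by nlinarith, ⟨x, hjx.symm⟩, Or.inr ?_⟩
      rw [PySem.Int.floordiv_eq_ediv_of_pos (by omega), ← hjx,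
        Int.mul_ediv_cancel_left x (by omega)]

-- the divisors of n² that are ≤ n are exactly the bounded products of two divisors of n
theorem prod_char (n : Int) (hn : 0 < n) (x : Int) :
    (∃ a, (1 ≤ a ∧ a ∣ n) ∧ ∃ b, (1 ≤ b ∧ b ∣ n) ∧ a * b ≤ n ∧ x = a * b) ↔
      1 ≤ x ∧ x < n + 1 ∧ x ∣ n * n := by
  constructor
  · rintro ⟨a, ⟨ha1, had⟩, b, ⟨hb1, hbd⟩, hab, rfl⟩
    exact ⟨by nlinarith, by omega, mul_dvd_mul had hbd⟩
  · rintro ⟨hx1, hxn, hxd⟩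
    obtain ⟨d1, d2, hd1, hd2, hx⟩ := exists_dvd_and_dvd_of_dvd_mul hxd
    have hne1 : d1 ≠ 0 := by rintro rfl; simp at hx; omega
    have hne2 : d2 ≠ 0 := by rintro rfl; simp at hx; omega
    have habs : |d1| * |d2| = x := by rw [← abs_mul, ← hx]; exact abs_of_pos (by omega)
    exact ⟨|d1|, ⟨abs_pos.mpr hne1, (abs_dvd d1 n).mpr hd1⟩,
      |d2|, ⟨abs_pos.mpr hne2, (abs_dvd d2 n).mpr hd2⟩, by omega, habs.symm⟩

-- ===== VERDICT (by name: the statement is the Claim_ definition above) =====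
theorem process_spec : Claim_equal_process := by
  intro n _
  unfold Spec_process
  rw [process_eq_map_filter]
  by_cases hn : n ≤ 0
  · rw [process_alt, if_pos hn, PySem.List.pyRange_one_eq_nil (by omega)]
    simp
  · have hn0 : 0 < n := by omega
    simp only [process_alt, if_neg hn]
    congr 1
    refine (PySem.List.sorted_eq_of_perm_of_pairwise_lt _ _ _ ?_ ?_).symm
    · refine (List.perm_ext_iff_of_nodup
        ((PySem.List.nodup_pyRange_one 1 (n + 1)).filter _) ?_).mpr ?_
      · exact nodup_prodFold n _ _ _ List.nodup_nil
      · intro x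
        rw [List.mem_filter, PySem.List.mem_pyRange_one, mem_prodFold]
        simp only [PySem.Set.empty, List.not_mem_nil, false_or]
        constructor
        · rintro ⟨⟨h1, h2⟩, h3⟩
          obtain ⟨a, ha, b, hb, hab, hx⟩ := (prod_char n hn0 x).mpr
            ⟨h1, h2, (PySem.Int.mod_eq_zero_iff_dvd _ _).mp (by simpa using h3)⟩
          exact ⟨a, (mem_divs n hn0 a).mpr ha, b, (mem_divs n hn0 b).mpr hb, hab, hx⟩
        · rintro ⟨a, ha, b, hb, hab, hx⟩
          obtain ⟨h1, h2, h3⟩ := (prod_char n hn0 x).mp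
            ⟨a, (mem_divs n hn0 a).mp ha, b, (mem_divs n hn0 b).mp hb, hab, hx⟩
          exact ⟨⟨h1, h2⟩, by simpa using (PySem.Int.mod_eq_zero_iff_dvd _ _).mpr h3⟩
    · exact (PySem.List.pairwise_lt_pyRange_one 1 (n + 1)).filter _
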